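-- pv_equiv track=rewrite | github.com/tunakodal/quad-core | quad-core/guide-backend/app/api/routes/route_endpoints.py | _calculate_days_from_poi_count
-- ===== SOURCE A (Python) =====
-- def _calculate_days_from_poi_count(poi_count: int) -> int:
--     """
--     Returns the recommended maximum number of trip days for a given POI count.
--
--     Thresholds assume approximately 9-14 POIs are visited per day.
--     Returns 8 as a fallback for POI counts exceeding 100.
--     """
--     THRESHOLDS = [
--         (9, 1),
--         (18, 2),
--         (30, 3),
--         (45, 4),
--         (63, 5),
--         (81, 6),
--         (100, 7),
--     ]
--
--     for limit, days in THRESHOLDS: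
--         if poi_count <= limit:
--             return days
--     return 8  # fallback (100+)
-- ===== SOURCE B (Python) =====
-- import bisect
--
-- _LIMITS = [9, 18, 30, 45, 63, 81, 100]
--
-- def _calculate_days_from_poi_count(poi_count: int) -> int:
--     """Binary-search the ascending limit table; 1-based index is the day count (8 past the table)."""
--     return bisect.bisect_left(_LIMITS, poi_count) + 1
-- ===== Notes on version B (the rewrite author's own statement) =====
-- stated objective: idiomatic
-- what changed: Replaced the linear scan over (limit, days) threshold pairs by bisect.bisect_left binary search on the ascending limit list, returning the 1-based insertion index (8 falls out naturally past the table).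
import Mathlib
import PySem

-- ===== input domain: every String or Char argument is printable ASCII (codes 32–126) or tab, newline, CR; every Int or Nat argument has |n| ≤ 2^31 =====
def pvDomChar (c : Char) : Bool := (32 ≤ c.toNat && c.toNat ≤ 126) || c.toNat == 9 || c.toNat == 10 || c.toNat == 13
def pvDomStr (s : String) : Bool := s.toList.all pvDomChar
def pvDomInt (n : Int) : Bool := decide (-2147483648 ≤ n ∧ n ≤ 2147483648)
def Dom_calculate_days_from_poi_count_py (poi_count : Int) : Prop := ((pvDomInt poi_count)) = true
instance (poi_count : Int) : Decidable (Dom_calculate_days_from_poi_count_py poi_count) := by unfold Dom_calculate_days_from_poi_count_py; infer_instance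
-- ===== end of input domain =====

-- B replaces A's linear scan over (limit, days) pairs by bisect_left binary search on the limit list (idiomatic, not faster at this size).
-- ===== PORT A =====
-- the for-loop with early return over THRESHOLDS, as structural recursion
def pvALoop (poi_count : Int) : List (Int × Int) → Int
  | [] => 8
  | (limit, days) :: rest => if poi_count ≤ limit then days else pvALoop poi_count rest

def calculate_days_from_poi_count_py (poi_count : Int) : Int :=
  pvALoop poi_count [(9, 1), (18, 2), (30, 3), (45, 4), (63, 5), (81, 6), (100, 7)]

-- ===== PORT B =====
def pvLimits : List Int := [9, 18, 30, 45, 63, 81, 100]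

-- hand port of bisect.bisect_left's while-loop; the fuel argument only makes the loop total
-- (fuel = hi - lo bounds the iteration count), the computation is bisect_left's.
def pvBisectLeft (a : List Int) (x : Int) : Nat → Nat → Nat → Nat
  | 0, lo, _ => lo
  | fuel + 1, lo, hi =>
    if lo < hi then
      let mid := (lo + hi) / 2
      if a.getD mid 0 < x then pvBisectLeft a x fuel (mid + 1) hi
      else pvBisectLeft a x fuel lo mid
    else lo

def calculate_days_from_poi_count_py_alt (poi_count : Int) : Int :=
  ((pvBisectLeft pvLimits poi_count pvLimits.length 0 pvLimits.length : Nat) : Int) + 1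

-- ===== PRECONDITION & SPEC =====
def Spec_calculate_days_from_poi_count_py (poi_count : Int) (out : Int) : Prop := out = calculate_days_from_poi_count_py_alt poi_count
instance (poi_count : Int) (out : Int) : Decidable (Spec_calculate_days_from_poi_count_py poi_count out) := by unfold Spec_calculate_days_from_poi_count_py; infer_instance

-- ===== CLAIM (what is proved, stated in full; the proofs are below) =====
def Claim_equal_calculate_days_from_poi_count_py : Prop := ∀ (poi_count : Int), Dom_calculate_days_from_poi_count_py poi_count → Spec_calculate_days_from_poi_count_py poi_count (calculate_days_from_poi_count_py poi_count)

-- ===== LEMMAS AND PROOFS =====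

-- ===== VERDICT (by name: the statement is the Claim_ definition above) =====
theorem calculate_days_from_poi_count_py_spec : Claim_equal_calculate_days_from_poi_count_py := by
  intro poi_count _
  unfold Spec_calculate_days_from_poi_count_py
  simp only [calculate_days_from_poi_count_py, calculate_days_from_poi_count_py_alt,
    pvALoop, pvBisectLeft, pvLimits, List.getD, List.length]
  norm_num
  split_ifs <;> omega
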